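-- pv_equiv track=rewrite | github.com/NoThisIsPatrik/functional_hmac_sha1 | st_bin.py | ntotp
-- ===== SOURCE A (Python) =====
-- def H(m):
--         # need rotate left (primitives only has shifts)
--     rol = lambda n,b:((n<<b)|(n>>(32-b)))&0xffffffff
--
--         # msg -> padded msg function map
--     mf = lambda i:(
--         m[i] if i<len(m) else           # Message
--         0x80000000 if i==len(m) else    # a single '1' bit..
--         (len(m)*32) if i==31 else       # Message lenth in bits as int32 last
--         0)                              # Rest is zeros
--
--         # expanded key pos -> key. mapping
--     w = lambda k,i: k(i) if i<16 else rol(w(k,i-3)^w(k,i-8)^w(k,i-14)^w(k,i-16),1)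
--
--
--         # inner loop.
--     C = (lambda S,k,i:((rol(S[0],5) + (
--                         (S[3]^(S[1]&(S[2]^S[3]))),
--                         (S[1]^S[2]^S[3]),
--                         (((S[1]&S[2])|(S[1]&S[3]))|(S[2]&S[3])),
--                         (S[1]^S[2]^S[3])
--                         )[i//20] + S[4] +
--                     ( 0x5A827999, 0x6ED9EBA1, 0x8F1BBCDC, 0xCA62C1D6)[i//20] +
--                     w(k,i)&0xffffffff),S[0],rol(S[1],30),S[2],S[3]))
--
--         # sha1 80 round block loop, tail recursive
--     ra = lambda L,k,i:(C(ra(L,k,i-1), k, i) if i else C(L, k, i))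
--
--         # Accumilator for adding, rather than replacing, the state @ new block
--     ladd = lambda L,k: (
--         (lambda P,Q:tuple( (x+y)&0xffffffff for (x,y) in zip(P,Q) ))(
--             L, ra(L,k,79) ))
--
--         # pass the function chain that maps top the input and the SHA1 init vector and we're off
--     return list(ladd(ladd(
--                 (0x67452301,0xefcdaB89,0x98Badcfe,0x10325476,0xc3d2e1f0), mf)
--                 ,lambda i:mf(i+16)))
--
-- def ntotp(s, t):
--         # b32 unpacker. Just being cutesy and going for zero deps
--     bM = ''.join(f"{'abcdefghijklmnopqrstuvwxyz234567'.index(c.lower()):05b}" for c in s if c!='=')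
--
--     if len(bM)%8:  # This is what two other b32 decoders do at least. <shrug>
--         bM = bM[:-(len(bM)%8)]
--
--     bM = bM + "0"*(512-len(bM))
--
--         # You may note that I strangely *do* use ascii '0'/'1' bit strings here.
--         # It's merely a convenient/compact way to do base32 decode - the reduced alphabet
--         # puts out 5 bits per char, i.e. replaces 8 chars with 5 bytes. Awkward, yo..
--         # With so little data, it's be nearly unrolled by itself. So, given the little data,
--         # I just unpack it to 5 bits, pile it all together, and split it back to words.
--
--     K = [int(bM[i:i+32],2) for i in range(0,len(bM),32)]
--     M = [ 0, t//30 ]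
--         # These two can be lambda:ed into the return too, just not totally feeling the benefit.
--
--     return (lambda t:((t>>(160-32-(t&15)*8))&0x7fffffff)%10**6)(
--         (lambda h:sum(h[i]<<((4-i)*32) for i in range(5)))(
--             H([a^0x5c5c5c5c for a in K] + H([a^0x36363636 for a in K]+M)) ))
-- ===== SOURCE B (Python) =====
-- M32 = 0xffffffff
-- IV = (0x67452301, 0xefcdab89, 0x98badcfe, 0x10325476, 0xc3d2e1f0)
--
--
-- def _rol(n, b):
--     return ((n << b) | (n >> (32 - b))) & M32
--
--
-- _VAL = dict(zip('abcdefghijklmnopqrstuvwxyz234567', range(32)))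
--
--
-- def _words(bits):
--     # pack the 0/1 bit list into big-endian integer words of up to 32 bits, one pass
--     out = []
--     w = 0
--     nb = 0
--     for b in bits:
--         w = 2 * w + b
--         nb += 1
--         if nb == 32:
--             out.append(w)
--             w = 0
--             nb = 0
--     if nb:
--         out.append(w)
--     return out
--
--
-- def _pad(m):
--     # materialise the padded 32-word message block pair
--     if len(m) >= 32:
--         return m[:32]
--     ws = m + [0x80000000] + [0] * (31 - len(m))
--     if len(m) <= 30:
--         ws[31] = len(m) * 32
--     return ws
--
--
-- def _sha1ish(m):
--     ws = _pad(m)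
--     state = IV
--     for blk in (ws[:16], ws[16:]):
--         # iteratively memoized message schedule
--         w = list(blk)
--         for i in range(16, 80):
--             w.append(_rol(w[i - 3] ^ w[i - 8] ^ w[i - 14] ^ w[i - 16], 1))
--         v0, v1, v2, v3, v4 = state
--         for i, wi in enumerate(w):
--             if i < 20:
--                 f, kc = v3 ^ (v1 & (v2 ^ v3)), 0x5A827999
--             elif i < 40:
--                 f, kc = v1 ^ v2 ^ v3, 0x6ED9EBA1
--             elif i < 60:
--                 f, kc = (v1 & v2) | (v1 & v3) | (v2 & v3), 0x8F1BBCDC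
--             else:
--                 f, kc = v1 ^ v2 ^ v3, 0xCA62C1D6
--             v0, v1, v2, v3, v4 = (_rol(v0, 5) + f + v4 + kc + wi) & M32, v0, _rol(v1, 30), v2, v3
--         state = tuple((p + q) & M32 for p, q in zip(state, (v0, v1, v2, v3, v4)))
--     return list(state)
--
--
-- def ntotp(s, t):
--     bits = []
--     for ch in s:
--         if ch != '=':
--             v = _VAL[ch.lower()]
--             bits.extend((v >> k) & 1 for k in (4, 3, 2, 1, 0))
--     bits = bits[:len(bits) - len(bits) % 8]
--     bits += [0] * (512 - len(bits))
--     K = _words(bits)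
--     inner = _sha1ish([a ^ 0x36363636 for a in K] + [0, t // 30])
--     outer = _sha1ish([a ^ 0x5c5c5c5c for a in K] + inner)
--     hv = 0
--     for x in outer:
--         hv = (hv << 32) + x
--     return ((hv >> (128 - 8 * (hv & 15))) & 0x7fffffff) % 10**6
-- ===== Notes on version B (the rewrite author's own statement) =====
-- stated objective: faster
-- what changed: A recomputes the SHA1 message schedule through an unmemoized 4-way recursion (w calls w(i-3),w(i-8),w(i-14),w(i-16) afresh for every of the 80 tail-recursive rounds) and decodes base32 by indexing an alphabet string into a '0'/'1' character string that is sliced and re-parsed with int(,2); B decodes through a precomputed value dict into an integer bit list packed into words in one pass, materialises the padded message as a list, precomputes each block's 80-word schedule iteratively, and runs the rounds as one fold over the enumerated schedule.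
import Mathlib
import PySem

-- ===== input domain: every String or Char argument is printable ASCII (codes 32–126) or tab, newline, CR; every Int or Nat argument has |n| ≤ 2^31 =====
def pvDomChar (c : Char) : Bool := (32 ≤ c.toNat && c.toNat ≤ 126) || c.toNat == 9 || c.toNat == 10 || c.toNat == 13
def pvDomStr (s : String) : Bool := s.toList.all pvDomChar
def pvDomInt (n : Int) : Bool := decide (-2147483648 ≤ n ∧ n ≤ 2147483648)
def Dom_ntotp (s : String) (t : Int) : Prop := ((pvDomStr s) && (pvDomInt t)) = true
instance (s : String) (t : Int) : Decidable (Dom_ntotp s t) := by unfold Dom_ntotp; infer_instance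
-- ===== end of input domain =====

-- B replaces A's unmemoized exponential schedule recursion by an iteratively built
-- 80-word schedule folded once per block, decodes base32 arithmetically from char codes
-- into an integer bit list, and materialises the padded message; objective: faster.

-- Python's & | ^ on int, exact also on negatives: Mathlib's Int.land/lor/xor compute the
-- same values as PySem's band/bor/bxor (see PYSEM.md) and evaluate fast; the proofs below
-- never unfold them (they are rewritten structurally), so the fast spelling is used.
def pvAnd (a b : Int) : Int := Int.land a b
def pvOr (a b : Int) : Int := Int.lor a b
def pvXor (a b : Int) : Int := Int.xor a b

-- rol = lambda n,b: ((n<<b)|(n>>(32-b))) & 0xffffffff — the identical helper line occurs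
-- in both Pythons, so it is defined once (Python << >> on int are Lean's <<< >>>)
def pvRol (n : Int) (b : Nat) : Int :=
  pvAnd (pvOr (n <<< b) (n >>> (32 - b))) 0xffffffff

-- ===== PORT A =====

def pvAlphabet : List Char := "abcdefghijklmnopqrstuvwxyz234567".toList

-- 'abcdefghijklmnopqrstuvwxyz234567'.index(c.lower()) : single-char needle, so str.index is
-- the first index of the character (ValueError = none, excluded by Pre_; the .getD 0 default
-- is never reached under Pre_).
def pvIdx (c : Char) : Nat :=
  (PySem.List.index? pvAlphabet (PySem.Chars.lowerChar c)).getD 0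

-- the msg -> padded-msg map mf (A's lambda)
def pvMf (m : List Int) (i : Nat) : Int :=
  if i < m.length then m.getD i 0
  else if i = m.length then 0x80000000
  else if i = 31 then (m.length * 32 : Int)
  else 0

-- w = lambda k,i: k(i) if i<16 else rol(w(k,i-3)^w(k,i-8)^w(k,i-14)^w(k,i-16),1)
def pvW (k : Nat → Int) (i : Nat) : Int :=
  if h : i < 16 then k i
  else pvRol (pvXor (pvXor (pvXor
        (pvW k (i - 3)) (pvW k (i - 8))) (pvW k (i - 14))) (pvW k (i - 16))) 1
termination_by i
decreasing_by all_goals omega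

-- the inner-loop lambda C (tuple-of-choices indexed by i//20; 'x + y & m' is '(x+y) & m')
def pvC (S : Int × Int × Int × Int × Int) (k : Nat → Int) (i : Nat) :
    Int × Int × Int × Int × Int :=
  match S with
  | (s0, s1, s2, s3, s4) =>
    (pvAnd
      (pvRol s0 5 +
        ([pvXor s3 (pvAnd s1 (pvXor s2 s3)),
          pvXor (pvXor s1 s2) s3,
          pvOr (pvOr (pvAnd s1 s2) (pvAnd s1 s3)) (pvAnd s2 s3),
          pvXor (pvXor s1 s2) s3].getD (i / 20) 0) +
        s4 +
        ([0x5A827999, 0x6ED9EBA1, 0x8F1BBCDC, 0xCA62C1D6].getD (i / 20) 0) +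
        pvW k i) 0xffffffff,
     s0, pvRol s1 30, s2, s3)

-- ra = lambda L,k,i: C(ra(L,k,i-1),k,i) if i else C(L,k,i)
def pvRa (L : Int × Int × Int × Int × Int) (k : Nat → Int) :
    Nat → Int × Int × Int × Int × Int
  | 0 => pvC L k 0
  | n + 1 => pvC (pvRa L k n) k (n + 1)

-- ladd = lambda L,k: tuple((x+y)&0xffffffff for (x,y) in zip(L, ra(L,k,79)))
def pvLadd (L : Int × Int × Int × Int × Int) (k : Nat → Int) :
    Int × Int × Int × Int × Int :=
  match L, pvRa L k 79 with
  | (a, b, c, d, e), (a', b', c', d', e') =>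
    (pvAnd (a + a') 0xffffffff, pvAnd (b + b') 0xffffffff,
     pvAnd (c + c') 0xffffffff, pvAnd (d + d') 0xffffffff,
     pvAnd (e + e') 0xffffffff)

def pvH (m : List Int) : List Int :=
  match pvLadd (pvLadd (0x67452301, 0xefcdaB89, 0x98Badcfe, 0x10325476, 0xc3d2e1f0)
                  (pvMf m))
          (fun i => pvMf m (i + 16)) with
  | (a, b, c, d, e) => [a, b, c, d, e]

-- int(x, 2) ported by hand as the binary fold; exact here because x is always a nonempty
-- string of '0'/'1' characters (no sign/space/underscore/prefix ever occurs).
def pvParseBin (cs : List Char) : Int :=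
  cs.foldl (fun a c => 2 * a + (if c = '1' then 1 else 0)) 0

def ntotp (s : String) (t : Int) : Int :=
  -- f"{v:05b}" = format(v,'05b') = binary digits zero-filled to width 5
  let bM0 : List Char := s.toList.flatMap (fun c =>
    if c = '=' then [] else PySem.Chars.zfill (PySem.Int.toBinChars (pvIdx c)) 5)
  let bM1 : List Char :=
    if bM0.length % 8 ≠ 0 then
      PySem.List.slice bM0 none (some (-((bM0.length % 8 : Nat) : Int)))
    else bM0
  -- "0"*(512-len(bM)) : a negative repeat count is the empty string = Nat truncated subtraction
  let bM : List Char := bM1 ++ List.replicate (512 - bM1.length) '0'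
  let K : List Int := (PySem.List.pyRange 0 (bM.length : Int) 32).map (fun i =>
    pvParseBin (PySem.List.slice bM (some i) (some (i + 32))))
  let M : List Int := [0, PySem.Int.floordiv t 30]
  let h : List Int :=
    pvH ((K.map (fun a => pvXor a 0x5c5c5c5c)) ++
         pvH ((K.map (fun a => pvXor a 0x36363636)) ++ M))
  let tt : Int :=
    ((PySem.List.pyRange 0 5 1).map (fun i =>
      -- h[i] << ((4-i)*32): the shift count is nonnegative (0 ≤ i < 5), so .toNat is exact
      PySem.List.pyGetD h i 0 <<< (((4 - i) * 32 : Int)).toNat)).sum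
  PySem.Int.mod
    (pvAnd (tt >>> (((160 : Int) - 32 - pvAnd tt 15 * 8)).toNat) 0x7fffffff)
    (10 ^ 6)

-- ===== PORT B =====

abbrev PvSt := Int × Int × Int × Int × Int

def pvM32 : Int := 0xffffffff

def pvIV : PvSt := (0x67452301, 0xefcdab89, 0x98badcfe, 0x10325476, 0xc3d2e1f0)

-- Source B's own & | ^ and _rol (same core functions; see the note above pvAnd)
def pvBand (a b : Int) : Int := Int.land a b
def pvBor (a b : Int) : Int := Int.lor a b
def pvBxor (a b : Int) : Int := Int.xor a b

def pvRotl (n : Int) (b : Nat) : Int :=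
  pvBand (pvBor (n <<< b) (n >>> (32 - b))) pvM32

-- _VAL = dict(zip(alphabet, range(32))); _VAL[c.lower()] (KeyError = none, excluded by
-- Pre_; the .getD 0 default is never reached under Pre_)
def pvTable : PySem.Dict Char Int :=
  PySem.Dict.ofList (pvAlphabet.zip (PySem.List.pyRange 0 32 1))

def pvVal (c : Char) : Int :=
  (PySem.Dict.get? pvTable (PySem.Chars.lowerChar c)).getD 0

-- (v >> k) & 1 for k in (4,3,2,1,0)
def pvBits5 (v : Int) : List Int :=
  [PySem.Int.band (v >>> 4) 1, PySem.Int.band (v >>> 3) 1, PySem.Int.band (v >>> 2) 1,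
   PySem.Int.band (v >>> 1) 1, PySem.Int.band v 1]

-- pack the bit list into big-endian words of up to 32 bits, in one pass
-- (w = 2*w + b; nb += 1; on nb == 32 emit w and reset — nb, a count 0..32, is a Nat)
def pvWordStep (s : List Int × Int × Nat) (b : Int) : List Int × Int × Nat :=
  match s with
  | (out, w, nb) =>
    if nb + 1 = 32 then (out ++ [2 * w + b], 0, 0) else (out, 2 * w + b, nb + 1)

def pvWordsB (bits : List Int) : List Int :=
  match bits.foldl pvWordStep ([], 0, 0) with
  | (out, w, nb) => if nb ≠ 0 then out ++ [w] else out

-- _pad: materialise the padded 32-word message (ws[31] = … ported as take 31 ++ [_])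
def pvPad (m : List Int) : List Int :=
  if 32 ≤ m.length then m.take 32
  else
    let ws : List Int := m ++ 0x80000000 :: List.replicate (31 - m.length) 0
    if m.length ≤ 30 then ws.take 31 ++ [((m.length : Int) * 32)] else ws

-- for i in range(16,80): w.append(rol(w[i-3]^w[i-8]^w[i-14]^w[i-16],1))
def pvSchedule (blk : List Int) : List Int :=
  (PySem.List.pyRange 16 80 1).foldl (fun w i =>
    w ++ [pvRotl (pvBxor (pvBxor (pvBxor
            (PySem.List.pyGetD w (i - 3) 0) (PySem.List.pyGetD w (i - 8) 0))
            (PySem.List.pyGetD w (i - 14) 0)) (PySem.List.pyGetD w (i - 16) 0)) 1]) blk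

-- one round of B's 'for i, wi in enumerate(w)' loop
def pvRoundB (S : PvSt) (p : Int × Int) :
    PvSt :=
  match S, p with
  | (v0, v1, v2, v3, v4), (i, wi) =>
    let fk : Int × Int :=
      if i < 20 then (pvBxor v3 (pvBand v1 (pvBxor v2 v3)), 0x5A827999)
      else if i < 40 then (pvBxor (pvBxor v1 v2) v3, 0x6ED9EBA1)
      else if i < 60 then
        (pvBor (pvBor (pvBand v1 v2) (pvBand v1 v3)) (pvBand v2 v3),
         0x8F1BBCDC)
      else (pvBxor (pvBxor v1 v2) v3, 0xCA62C1D6)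
    (pvBand (pvRotl v0 5 + fk.1 + v4 + fk.2 + wi) pvM32,
     v0, pvRotl v1 30, v2, v3)

-- one block: schedule, the enumerate-driven 80 rounds, then add into the running state
def pvBlockStep (st : PvSt) (blk : List Int) :
    PvSt :=
  match st, (PySem.List.enumerate (pvSchedule blk) 0).foldl pvRoundB st with
  | (p0, p1, p2, p3, p4), (q0, q1, q2, q3, q4) =>
    (pvBand (p0 + q0) pvM32, pvBand (p1 + q1) pvM32,
     pvBand (p2 + q2) pvM32, pvBand (p3 + q3) pvM32,
     pvBand (p4 + q4) pvM32)

def pvSha1ish (m : List Int) : List Int :=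
  let ws : List Int := pvPad m
  match [ws.take 16, ws.drop 16].foldl pvBlockStep
      pvIV with
  | (v0, v1, v2, v3, v4) => [v0, v1, v2, v3, v4]

def ntotp_alt (s : String) (t : Int) : Int :=
  -- for c in s: if c != '=': bits.extend((v>>k)&1 …)
  let bits : List Int := s.toList.foldl
    (fun out ch => if ch ≠ '=' then out ++ pvBits5 (pvVal ch) else out) []
  -- bits[:len(bits) - len(bits)%8]
  let bits2 : List Int := bits.take (bits.length - bits.length % 8)
  let bits3 : List Int := bits2 ++ List.replicate (512 - bits2.length) 0
  let K : List Int := pvWordsB bits3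
  let inner : List Int :=
    pvSha1ish ((K.map (fun a => pvBxor a 0x36363636)) ++ [0, PySem.Int.floordiv t 30])
  let outer : List Int :=
    pvSha1ish ((K.map (fun a => pvBxor a 0x5c5c5c5c)) ++ inner)
  let hv : Int := outer.foldl (fun h x => (h <<< (32 : Nat)) + x) 0
  -- hv >> (128 - 8*(hv&15)): the shift count is nonnegative, so .toNat is exact
  PySem.Int.mod
    (pvBand (hv >>> (((128 : Int) - 8 * pvBand hv 15)).toNat) 0x7fffffff)
    (10 ^ 6)

-- ===== PRECONDITION & SPEC =====
-- Pre_ excludes exactly the inputs where A raises ValueError: a character of s (other than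
-- '=') whose lowercase form is not in the base32 alphabet.
def Pre_ntotp (s : String) (t : Int) : Prop :=
  (s.toList.all (fun c =>
    c == '=' || (PySem.List.index? pvAlphabet (PySem.Chars.lowerChar c)).isSome)) = true
instance (s : String) (t : Int) : Decidable (Pre_ntotp s t) := by
  unfold Pre_ntotp; infer_instance

def pvWitness_ntotp : String × Int := ("Ab3=", 59)

def Spec_ntotp (s : String) (t : Int) (out : Int) : Prop := out = ntotp_alt s t
instance (s : String) (t : Int) (out : Int) : Decidable (Spec_ntotp s t out) := by
  unfold Spec_ntotp; infer_instance

-- ===== CLAIM (what is proved, stated in full; the proofs are below) =====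
def Claim_equal_ntotp : Prop :=
  ∀ (s : String) (t : Int), Dom_ntotp s t → Pre_ntotp s t → Spec_ntotp s t (ntotp s t)

-- ===== LEMMAS AND PROOFS =====

-- proof-only helpers
def bChar (b : Int) : Char := if b = 1 then '1' else '0'

lemma pv_idx_lt {c : Char}
    (h : (PySem.List.index? pvAlphabet (PySem.Chars.lowerChar c)).isSome = true) :
    pvIdx c < 32 := by
  unfold pvIdx
  cases hx : PySem.List.index? pvAlphabet (PySem.Chars.lowerChar c) with
  | none => rw [hx] at h; simp at h
  | some n =>
    obtain ⟨hn, -⟩ := List.idxOf?_eq_some_iff.mp hx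
    have hl : pvAlphabet.length = 32 := by decide
    simp only [Option.getD_some]
    omega

-- the dict value agrees with the alphabet index on alphabet characters
set_option maxRecDepth 8192 in
lemma val_tab : (pvAlphabet.all (fun k =>
    (PySem.Dict.get? pvTable k).getD 0
      == (((PySem.List.index? pvAlphabet k).getD 0 : Nat) : Int))) = true := by decide

lemma val_eq {c : Char}
    (h : (PySem.List.index? pvAlphabet (PySem.Chars.lowerChar c)).isSome = true) :
    pvVal c = ((pvIdx c : Nat) : Int) := by
  have hm : PySem.Chars.lowerChar c ∈ pvAlphabet := by
    rcases hx : PySem.List.index? pvAlphabet (PySem.Chars.lowerChar c) with _ | n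
    · rw [hx] at h; simp at h
    · obtain ⟨hn, he, -⟩ := PySem.List.getElem_of_index?_eq_some hx
      exact he ▸ List.getElem_mem _
  have h := List.all_eq_true.mp val_tab _ hm
  rw [beq_iff_eq] at h
  unfold pvVal pvIdx
  exact h

lemma zfill_bits : ∀ v : Nat, v < 32 →
    PySem.Chars.zfill (PySem.Int.toBinChars (v : Int)) 5 = (pvBits5 (v : Int)).map bChar := by
  decide

lemma bits_map (l : List Char)
    (h : ∀ c ∈ l, c ≠ '=' →
      (PySem.List.index? pvAlphabet (PySem.Chars.lowerChar c)).isSome = true) :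
    l.flatMap (fun c =>
        if c = '=' then [] else PySem.Chars.zfill (PySem.Int.toBinChars (pvIdx c)) 5)
      = (l.flatMap (fun c => if c = '=' then [] else pvBits5 (pvVal c))).map bChar := by
  rw [List.map_flatMap]
  apply List.flatMap_congr
  intro c hc
  by_cases he : c = '='
  · simp [he]
  · simp only [he, if_false]
    rw [val_eq (h c hc he)]
    exact zfill_bits _ (pv_idx_lt (h c hc he))

-- B's explicit accumulate-loop over the string is the flatMap of its body
lemma foldl_bits (l : List Char) : ∀ acc : List Int,
    l.foldl (fun acc c => if c ≠ '=' then acc ++ pvBits5 (pvVal c) else acc) acc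
      = acc ++ l.flatMap (fun c => if c = '=' then [] else pvBits5 (pvVal c)) := by
  induction l with
  | nil => intro acc; simp
  | cons c l ih =>
    intro acc
    simp only [List.foldl_cons, List.flatMap_cons]
    by_cases hc : c = '='
    · rw [if_neg (by simp [hc]), ih, hc]
      simp
    · rw [if_pos hc, ih, if_neg hc, List.append_assoc]

lemma mem_bits5 (v : Int) : ∀ b ∈ pvBits5 v, b = 0 ∨ b = 1 := by
  have h1 : ∀ a : Int, PySem.Int.band a 1 = 0 ∨ PySem.Int.band a 1 = 1 := by
    intro a
    rw [PySem.Int.band_one]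
    have hn := PySem.Int.mod_nonneg a (b := 2) (by norm_num)
    have hl := PySem.Int.mod_lt a (b := 2) (by norm_num)
    omega
  intro b hb
  simp only [pvBits5, List.mem_cons] at hb
  rcases hb with h | h | h | h | h | h <;> first | (subst h; apply h1) | exact absurd h (by simp)

lemma parse_map : ∀ (cs : List Int) (x : Int), (∀ b ∈ cs, b = 0 ∨ b = 1) →
    List.foldl (fun a c => 2 * a + (if c = '1' then 1 else 0)) x (cs.map bChar)
      = cs.foldl (fun a b => 2 * a + b) x := by
  intro cs
  induction cs with
  | nil => intro x h; simp
  | cons b bs ih =>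
    intro x h
    simp only [List.map_cons, List.foldl_cons]
    rcases h b (by simp) with h0 | h1
    · subst h0; rw [show bChar 0 = '0' from rfl, if_neg (by decide)]
      exact ih _ (fun b hb => h b (by simp [hb]))
    · subst h1; rw [show bChar 1 = '1' from rfl, if_pos rfl]
      exact ih _ (fun b hb => h b (by simp [hb]))

-- proof-only: the 32-bit chunking of a bit list as a take/drop recursion
def pvChunks : List Int → List Int
  | [] => []
  | b :: bs =>
    ((b :: bs).take 32).foldl (fun a bit => 2 * a + bit) 0 :: pvChunks ((b :: bs).drop 32)
termination_by bs => bs.length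
decreasing_by simp

-- the chunking of a bit list into 32-bit words, in pure Nat range form, equals pvChunks
lemma words_aux : ∀ (bits : List Int),
    (List.range ((bits.length + 31) / 32)).map (fun k =>
        (List.take 32 (List.drop (32 * k) bits)).foldl (fun a b => 2 * a + b) 0)
      = pvChunks bits := by
  intro bits
  induction hn : bits.length using Nat.strong_induction_on generalizing bits with
  | _ n ih =>
  subst hn
  cases bits with
  | nil => norm_num [pvChunks]
  | cons b bs =>
    have hC : ((b :: bs).length + 31) / 32 = bs.length / 32 + 1 := by
      simp only [List.length_cons]; omega
    rw [hC, List.range_succ_eq_map, List.map_cons, List.map_map]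
    rw [pvChunks]
    refine congrArg₂ List.cons (by norm_num) ?_
    have htail : ((List.drop 31 bs).length + 31) / 32 = bs.length / 32 := by
      simp only [List.length_drop]; omega
    simp only [List.drop_succ_cons]
    rw [← ih ((List.drop 31 bs).length)
          (by simp only [List.length_drop, List.length_cons]; omega) _ rfl, htail]
    apply List.map_congr_left
    intro k hk
    simp only [Function.comp_apply]
    have hdrop : List.drop (32 * Nat.succ k) (b :: bs) = List.drop (32 * k) (List.drop 31 bs) := by
      rw [List.drop_drop, show 32 * Nat.succ k = (31 + 32 * k) + 1 by omega,
          List.drop_succ_cons]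
    rw [hdrop]

lemma fold_prefix : ∀ (cs out : List Int) (w : Int) (nb : Nat),
    cs.foldl pvWordStep (out, w, nb)
      = (out ++ (cs.foldl pvWordStep ([], w, nb)).1,
         (cs.foldl pvWordStep ([], w, nb)).2.1, (cs.foldl pvWordStep ([], w, nb)).2.2) := by
  intro cs
  induction cs with
  | nil => intro out w nb; simp
  | cons c cs ih =>
    intro out w nb
    simp only [List.foldl_cons]
    by_cases h : nb + 1 = 32
    · rw [show pvWordStep (out, w, nb) c = (out ++ [2 * w + c], 0, 0) from by
          simp [pvWordStep, h],
        show pvWordStep (([] : List Int), w, nb) c = ([2 * w + c], 0, 0) from by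
          simp [pvWordStep, h]]
      rw [ih (out ++ [2 * w + c]) 0 0, ih [2 * w + c] 0 0]
      simp
    · rw [show pvWordStep (out, w, nb) c = (out, 2 * w + c, nb + 1) from by
          simp [pvWordStep, h],
        show pvWordStep (([] : List Int), w, nb) c = ([], 2 * w + c, nb + 1) from by
          simp [pvWordStep, h]]
      exact ih out (2 * w + c) (nb + 1)

lemma fold_mid : ∀ (cs : List Int) (nb : Nat) (w : Int) (out rest : List Int),
    nb + cs.length = 32 → nb < 32 →
    (cs ++ rest).foldl pvWordStep (out, w, nb)
      = rest.foldl pvWordStep (out ++ [cs.foldl (fun a b => 2 * a + b) w], 0, 0) := by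
  intro cs
  induction cs with
  | nil => intro nb w out rest h hlt; simp at h; omega
  | cons c cs ih =>
    intro nb w out rest h hlt
    simp only [List.cons_append, List.foldl_cons]
    by_cases h32 : nb + 1 = 32
    · have hnil : cs = [] := by
        have hl : cs.length = 0 := by simp at h; omega
        exact List.length_eq_zero_iff.mp hl
      subst hnil
      rw [show pvWordStep (out, w, nb) c = (out ++ [2 * w + c], 0, 0) from by
          simp [pvWordStep, h32]]
      simp
    · rw [show pvWordStep (out, w, nb) c = (out, 2 * w + c, nb + 1) from by
          simp [pvWordStep, h32]]
      rw [ih (nb + 1) (2 * w + c) out rest (by simp at h; omega) (by omega)]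

lemma fold_part : ∀ (cs : List Int) (nb : Nat) (w : Int) (out : List Int),
    nb + cs.length < 32 →
    cs.foldl pvWordStep (out, w, nb)
      = (out, cs.foldl (fun a b => 2 * a + b) w, nb + cs.length) := by
  intro cs
  induction cs with
  | nil => intro nb w out h; simp
  | cons c cs ih =>
    intro nb w out h
    simp only [List.foldl_cons]
    rw [show pvWordStep (out, w, nb) c = (out, 2 * w + c, nb + 1) from by
        simp only [List.length_cons] at h
        simp [pvWordStep, show ¬ (nb + 1 = 32) from by omega]]
    rw [ih (nb + 1) (2 * w + c) out (by simp only [List.length_cons] at h; omega)]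
    simp only [List.length_cons]
    have hn : nb + 1 + cs.length = nb + (cs.length + 1) := by omega
    rw [hn]

lemma words_eq_chunks : ∀ bits : List Int, pvWordsB bits = pvChunks bits := by
  intro bits
  induction hn : bits.length using Nat.strong_induction_on generalizing bits with
  | _ n ih =>
  subst hn
  cases bits with
  | nil => simp [pvWordsB, pvChunks]
  | cons b bs =>
    by_cases hlen : (b :: bs).length < 32
    · unfold pvWordsB
      rw [fold_part (b :: bs) 0 0 [] (by omega)]
      rw [pvChunks]
      have hd : (b :: bs).drop 32 = [] := List.drop_eq_nil_of_le (by omega)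
      have ht : (b :: bs).take 32 = b :: bs := List.take_of_length_le (by omega)
      rw [hd, ht]
      simp [pvChunks]
    · unfold pvWordsB
      have h1 : (b :: bs).foldl pvWordStep ([], 0, 0)
          = ((b :: bs).drop 32).foldl pvWordStep
              ([((b :: bs).take 32).foldl (fun a bit => 2 * a + bit) 0], 0, 0) := by
        conv_lhs => rw [← List.take_append_drop 32 (b :: bs)]
        rw [fold_mid _ 0 _ _ _ (by simp only [List.length_take]; omega) (by omega)]
        simp
      rw [h1, fold_prefix]
      have hih : pvWordsB ((b :: bs).drop 32) = pvChunks ((b :: bs).drop 32) :=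
        ih ((b :: bs).drop 32).length (by simp only [List.length_drop, List.length_cons]; omega) _ rfl
      rw [pvChunks, ← hih]
      unfold pvWordsB
      rcases ((b :: bs).drop 32).foldl pvWordStep ([], 0, 0) with ⟨qo, qw, qnb⟩
      by_cases hq : qnb ≠ 0 <;> simp [hq]

-- ============ padding lemmas ============

lemma pad_len (m : List Int) : (pvPad m).length = 32 := by
  unfold pvPad
  split_ifs with h1 h2 <;>
    simp only [List.length_take, List.length_append, List.length_cons,
      List.length_replicate, List.length_nil] <;> omega

lemma pad_getD (m : List Int) (j : Nat) (hj : j < 32) :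
    (pvPad m).getD j 0 = pvMf m j := by
  unfold pvPad pvMf
  by_cases h32 : 32 ≤ m.length
  · rw [if_pos h32, if_pos (show j < m.length by omega)]
    rw [List.getD_eq_getElem?_getD, List.getElem?_take_of_lt hj, ← List.getD_eq_getElem?_getD]
  · rw [if_neg h32]
    have hws : (m ++ 0x80000000 :: List.replicate (31 - m.length) 0).length = 32 := by
      simp only [List.length_append, List.length_cons, List.length_replicate]; omega
    have hmid : ∀ i : Nat, i < 32 →
        (m ++ 0x80000000 :: List.replicate (31 - m.length) 0).getD i 0
          = if i < m.length then m.getD i 0 else if i = m.length then 0x80000000 else 0 := by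
      intro i hi
      by_cases him : i < m.length
      · rw [List.getD_append _ _ _ _ him, if_pos him]
      · rw [List.getD_append_right _ _ _ _ (by omega), if_neg him]
        by_cases hie : i = m.length
        · rw [if_pos hie, hie, Nat.sub_self]
          rfl
        · rw [if_neg hie]
          have hsucc : i - m.length = (i - m.length - 1) + 1 := by omega
          rw [hsucc]
          simp only [List.getD_cons_succ]
          rw [List.getD_replicate _ (by omega)]
    by_cases h30 : m.length ≤ 30
    · rw [if_pos h30]
      by_cases hj31 : j < 31
      · rw [List.getD_append _ _ _ _ (by simp only [List.length_take, hws]; omega)]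
        rw [List.getD_eq_getElem?_getD, List.getElem?_take_of_lt hj31,
            ← List.getD_eq_getElem?_getD, hmid j (by omega)]
        by_cases him : j < m.length
        · rw [if_pos him, if_pos him]
        · rw [if_neg him, if_neg him]
          by_cases hje : j = m.length
          · rw [if_pos hje, if_pos hje]
          · rw [if_neg hje, if_neg hje, if_neg (by omega)]
      · have hj' : j = 31 := by omega
        subst hj'
        have hlt : (((m ++ 0x80000000 :: List.replicate (31 - m.length) 0).take 31).length ≤ 31) := by
          simp only [List.length_take, hws]; omega
        rw [List.getD_append_right _ _ _ _ (by simpa using hlt)]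
        simp only [List.length_take, hws]
        rw [if_neg (by omega), if_neg (by omega)]
        simp
    · -- m.length = 31: no length word is appended
      rw [if_neg h30, hmid j hj]
      by_cases him : j < m.length
      · rw [if_pos him, if_pos him]
      · rw [if_neg him, if_neg him]
        by_cases hje : j = m.length
        · rw [if_pos hje, if_pos hje]
        · rw [if_neg hje, if_neg hje, if_neg (by omega)]

-- ============ schedule and round lemmas ============

def pvSchedStep (w : List Int) (i : Int) : List Int :=
  w ++ [pvRotl (pvBxor (pvBxor (pvBxor
          (PySem.List.pyGetD w (i - 3) 0) (PySem.List.pyGetD w (i - 8) 0))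
          (PySem.List.pyGetD w (i - 14) 0)) (PySem.List.pyGetD w (i - 16) 0)) 1]

lemma pvSchedule_eq_foldl (blk : List Int) :
    pvSchedule blk = (PySem.List.pyRange 16 80 1).foldl pvSchedStep blk := rfl

lemma sched_aux (k : Nat → Int) (blk : List Int) (hl : blk.length = 16)
    (hb : ∀ j, j < 16 → blk.getD j 0 = k j) :
    ∀ d : Nat,
      ((PySem.List.pyRange 16 (16 + (d : Int)) 1).foldl pvSchedStep blk).length = 16 + d ∧
      (∀ i, i < 16 + d →
        ((PySem.List.pyRange 16 (16 + (d : Int)) 1).foldl pvSchedStep blk).getD i 0 = pvW k i) := by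
  intro d
  induction d with
  | zero =>
    rw [show ((16 : Int) + (0 : Nat) : Int) = 16 by norm_num,
        PySem.List.pyRange_one_eq_nil (le_refl _)]
    simp only [List.foldl_nil]
    refine ⟨hl, ?_⟩
    intro i hi
    have h16 : i < 16 := by omega
    rw [pvW, dif_pos h16]
    exact hb i h16
  | succ d ihd =>
    have hcast : (16 : Int) + ((d + 1 : Nat) : Int) = (16 + (d : Int)) + 1 := by push_cast; ring
    rw [hcast, PySem.List.pyRange_one_succ_right (by omega), List.foldl_append]
    set W := (PySem.List.pyRange 16 (16 + (d : Int)) 1).foldl pvSchedStep blk with hW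
    obtain ⟨ihl, ihv⟩ := ihd
    simp only [List.foldl_cons, List.foldl_nil]
    have hval : pvSchedStep W (16 + (d : Int)) = W ++ [pvW k (16 + d)] := by
      unfold pvSchedStep
      congr 2
      rw [show ((16:Int) + (d:Int)) - 3 = ((13 + d : Nat) : Int) by push_cast; ring,
          show ((16:Int) + (d:Int)) - 8 = ((8 + d : Nat) : Int) by push_cast; ring,
          show ((16:Int) + (d:Int)) - 14 = ((2 + d : Nat) : Int) by push_cast; ring,
          show ((16:Int) + (d:Int)) - 16 = ((d : Nat) : Int) by ring]
      simp only [PySem.List.pyGetD_natCast]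
      rw [ihv (13 + d) (by omega), ihv (8 + d) (by omega), ihv (2 + d) (by omega),
          ihv d (by omega)]
      have h16 : ¬ (16 + d < 16) := by omega
      have hrec : pvW k (16 + d) = pvRotl (pvBxor (pvBxor (pvBxor
          (pvW k (13 + d)) (pvW k (8 + d))) (pvW k (2 + d))) (pvW k d)) 1 := by
        rw [pvW, dif_neg h16]
        simp only [show 16 + d - 3 = 13 + d from by omega, show 16 + d - 8 = 8 + d from by omega,
          show 16 + d - 14 = 2 + d from by omega, show 16 + d - 16 = d from by omega,
          pvRotl, pvRol, pvBxor, pvXor, pvBand, pvAnd, pvBor, pvOr, pvM32, pvIV]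
      rw [hrec]
    rw [hval]
    constructor
    · simp only [List.length_append, ihl, List.length_cons, List.length_nil]
      omega
    · intro i hi
      by_cases hlt : i < 16 + d
      · rw [List.getD_append _ _ _ _ (by omega)]
        exact ihv i hlt
      · have hie : i = 16 + d := by omega
        subst hie
        rw [List.getD_append_right W [pvW k (16 + d)] 0 (16 + d) (by omega)]
        simp [ihl]

lemma sched_full (k : Nat → Int) (blk : List Int) (hl : blk.length = 16)
    (hb : ∀ j, j < 16 → blk.getD j 0 = k j) :
    ∀ i, i < 80 → (pvSchedule blk).getD i 0 = pvW k i := by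
  intro i hi
  have h := (sched_aux k blk hl hb 64).2 i (by omega)
  rw [pvSchedule_eq_foldl]
  rw [show (80 : Int) = 16 + ((64 : Nat) : Int) by norm_num]
  exact h

lemma sched_len (k : Nat → Int) (blk : List Int) (hl : blk.length = 16)
    (hb : ∀ j, j < 16 → blk.getD j 0 = k j) : (pvSchedule blk).length = 80 := by
  have h := (sched_aux k blk hl hb 64).1
  rw [pvSchedule_eq_foldl, show (80 : Int) = 16 + ((64 : Nat) : Int) by norm_num]
  exact h

lemma pv_round_eq (S : Int × Int × Int × Int × Int) (k : Nat → Int) (W : List Int)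
    (i : Nat) (hi : i < 80) (hw : W.getD i 0 = pvW k i) :
    pvRoundB S ((i : Int), PySem.List.pyGetD W (i : Int) 0) = pvC S k i := by
  obtain ⟨a, b, c, d, e⟩ := S
  unfold pvRoundB pvC
  rw [PySem.List.pyGetD_natCast, hw]
  by_cases h0 : i < 20
  · have hd : i / 20 = 0 := by omega
    have h0i : ((i : Int) < 20) := by exact_mod_cast h0
    simp [h0i, hd, pvRotl, pvRol, pvBxor, pvXor, pvBand, pvAnd, pvBor, pvOr, pvM32, pvIV]
  · by_cases h1 : i < 40
    · have hd : i / 20 = 1 := by omega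
      have h0i : ¬ ((i : Int) < 20) := by exact_mod_cast h0
      have h1i : ((i : Int) < 40) := by exact_mod_cast h1
      simp [h0i, h1i, hd, pvRotl, pvRol, pvBxor, pvXor, pvBand, pvAnd, pvBor, pvOr, pvM32, pvIV]
    · by_cases h2 : i < 60
      · have hd : i / 20 = 2 := by omega
        have h0i : ¬ ((i : Int) < 20) := by exact_mod_cast h0
        have h1i : ¬ ((i : Int) < 40) := by exact_mod_cast h1
        have h2i : ((i : Int) < 60) := by exact_mod_cast h2
        simp [h0i, h1i, h2i, hd, pvRotl, pvRol, pvBxor, pvXor, pvBand, pvAnd, pvBor, pvOr, pvM32, pvIV]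
      · have hd : i / 20 = 3 := by omega
        have h0i : ¬ ((i : Int) < 20) := by exact_mod_cast h0
        have h1i : ¬ ((i : Int) < 40) := by exact_mod_cast h1
        have h2i : ¬ ((i : Int) < 60) := by exact_mod_cast h2
        simp [h0i, h1i, h2i, hd, pvRotl, pvRol, pvBxor, pvXor, pvBand, pvAnd, pvBor, pvOr, pvM32, pvIV]

lemma ra_eq (L : Int × Int × Int × Int × Int) (k : Nat → Int) (W : List Int)
    (hW : ∀ i, i < 80 → W.getD i 0 = pvW k i) :
    ∀ n : Nat, n < 80 →
      (PySem.List.pyRange 0 ((n : Int) + 1) 1).foldl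
          (fun S j => pvRoundB S (j, PySem.List.pyGetD W j 0)) L = pvRa L k n := by
  intro n
  induction n with
  | zero =>
    intro hn
    rw [show ((0 : Nat) : Int) + 1 = (0 : Int) + 1 by norm_num, PySem.List.pyRange_one_singleton]
    simp only [List.foldl_cons, List.foldl_nil]
    exact pv_round_eq L k W 0 (by omega) (hW 0 (by omega))
  | succ n ihn =>
    intro hn
    rw [PySem.List.pyRange_one_succ_right (by positivity), List.foldl_append]
    have hc : ((n + 1 : Nat) : Int) = ((n : Nat) : Int) + 1 := by push_cast; ring
    rw [hc, ihn (by omega)]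
    simp only [List.foldl_cons, List.foldl_nil]
    rw [← hc]
    rw [pv_round_eq _ k W (n + 1) (by omega) (hW (n + 1) (by omega))]
    rfl

set_option maxRecDepth 4096 in
lemma block_eq (st : Int × Int × Int × Int × Int) (k : Nat → Int) (blk : List Int)
    (hl : blk.length = 16) (hb : ∀ j, j < 16 → blk.getD j 0 = k j) :
    pvBlockStep st blk = pvLadd st k := by
  unfold pvBlockStep pvLadd
  have hW := sched_full k blk hl hb
  have hlen : (pvSchedule blk).length = 80 := sched_len k blk hl hb
  have henum := PySem.List.enumerate_eq_map_pyRange (pvSchedule blk) 0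
  have hra : (PySem.List.enumerate (pvSchedule blk) 0).foldl pvRoundB st = pvRa st k 79 := by
    rw [henum, List.foldl_map, PySem.List.len_eq, hlen,
        show ((80 : Nat) : Int) = ((79 : Nat) : Int) + 1 by norm_num]
    exact ra_eq st k (pvSchedule blk) hW 79 (by omega)
  rw [hra]
  simp only [pvRotl, pvRol, pvBxor, pvXor, pvBand, pvAnd, pvBor, pvOr, pvM32, pvIV]

lemma sha1_eq (m : List Int) : pvSha1ish m = pvH m := by
  unfold pvSha1ish pvH
  have hws : ∀ j, j < 32 → (pvPad m).getD j 0 = pvMf m j := pad_getD m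
  have hlen : (pvPad m).length = 32 := pad_len m
  have h1l : ((pvPad m).take 16).length = 16 := by simp [hlen]
  have h1b : ∀ j, j < 16 → ((pvPad m).take 16).getD j 0 = pvMf m j := by
    intro j hj
    rw [List.getD_eq_getElem?_getD, List.getElem?_take_of_lt (by omega), ← List.getD_eq_getElem?_getD]
    exact hws j (by omega)
  have h2l : ((pvPad m).drop 16).length = 16 := by simp [hlen]
  have h2b : ∀ j, j < 16 → ((pvPad m).drop 16).getD j 0 = pvMf m (j + 16) := by
    intro j hj
    rw [List.getD_eq_getElem?_getD, List.getElem?_drop, ← List.getD_eq_getElem?_getD]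
    rw [hws (16 + j) (by omega)]
    congr 1; omega
  simp only [List.foldl_cons, List.foldl_nil, pvIV]
  rw [block_eq _ (pvMf m) _ h1l (fun j hj => h1b j hj),
      block_eq _ (fun i => pvMf m (i + 16)) _ h2l (fun j hj => h2b j hj)]

-- the two final accumulations of the 5 state words agree
lemma accum_eq (a b c d e : Int) :
    ((PySem.List.pyRange 0 5 1).map (fun i =>
        PySem.List.pyGetD [a, b, c, d, e] i 0 <<< (((4 - i) * 32 : Int)).toNat)).sum
      = [a, b, c, d, e].foldl (fun (h : Int) (x : Int) => (h <<< (32 : Nat)) + x) (0 : Int) := by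
  have h5 : PySem.List.pyRange 0 5 1 = [0, 1, 2, 3, 4] := by decide
  rw [h5]
  simp only [List.map_cons, List.map_nil, List.sum_cons, List.sum_nil, List.foldl_cons,
    List.foldl_nil]
  simp only [show (((4 - (0 : Int)) * 32 : Int)).toNat = 128 from rfl,
    show (((4 - (1 : Int)) * 32 : Int)).toNat = 96 from rfl,
    show (((4 - (2 : Int)) * 32 : Int)).toNat = 64 from rfl,
    show (((4 - (3 : Int)) * 32 : Int)).toNat = 32 from rfl,
    show (((4 - (4 : Int)) * 32 : Int)).toNat = 0 from rfl]
  norm_num [PySem.List.pyGetD_ofNat', PySem.List.pyGetD_zero_cons, Int.shiftLeft_eq]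
  ring

lemma accum_H (m : List Int) :
    ((PySem.List.pyRange 0 5 1).map (fun i =>
        PySem.List.pyGetD (pvH m) i 0 <<< (((4 - i) * 32 : Int)).toNat)).sum
      = (pvH m).foldl (fun (h : Int) (x : Int) => (h <<< (32 : Nat)) + x) (0 : Int) := by
  unfold pvH
  rcases pvLadd (pvLadd (0x67452301, 0xefcdaB89, 0x98Badcfe, 0x10325476, 0xc3d2e1f0)
      (pvMf m)) (fun i => pvMf m (i + 16)) with ⟨a, b, c, d, e⟩
  exact accum_eq a b c d e

-- the truncation step: A's negative-end slice of the char string is B's take, mapped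
lemma trunc_eq (bits : List Int) :
    (if (bits.map bChar).length % 8 ≠ 0 then
        PySem.List.slice (bits.map bChar) none (some (-(((bits.map bChar).length % 8 : Nat) : Int)))
      else bits.map bChar)
      = (bits.take (bits.length - bits.length % 8)).map bChar := by
  by_cases h8 : (bits.map bChar).length % 8 = 0
  · rw [if_neg (by omega)]
    have h8' : bits.length % 8 = 0 := by simpa using h8
    rw [h8', Nat.sub_zero, List.take_length]
  · rw [if_pos h8, PySem.List.slice_to_neg_natCast _ _ (by omega), List.map_take,
      List.length_map]

lemma pad_rep_eq (l : List Int) :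
    (l.map bChar) ++ List.replicate (512 - (l.map bChar).length) '0'
      = (l ++ List.replicate (512 - l.length) 0).map bChar := by
  simp [List.map_append, List.map_replicate, List.length_map, bChar]

lemma chunksA_eq (bits : List Int) (h01 : ∀ x ∈ bits, x = 0 ∨ x = 1) :
    (PySem.List.pyRange 0 ((bits.map bChar).length : Int) 32).map (fun i =>
        pvParseBin (PySem.List.slice (bits.map bChar) (some i) (some (i + 32))))
      = pvChunks bits := by
  rw [PySem.List.pyRange_of_pos 0 _ (by norm_num), List.map_map]
  have hN : (if (0 : Int) < ((bits.map bChar).length : Int) then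
      ((((bits.map bChar).length : Int) - 0 + 32 - 1) / 32).toNat else 0)
      = (bits.length + 31) / 32 := by
    simp only [List.length_map]
    split <;> omega
  rw [hN, ← words_aux bits]
  apply List.map_congr_left
  intro k hk
  simp only [Function.comp_apply]
  rw [show (0 + 32 * (k : Int)) = ((32 * k : Nat) : Int) by push_cast; ring,
      show (((32 * k : Nat) : Int) + 32) = ((32 * k : Nat) : Int) + ((32 : Nat) : Int) by
        push_cast; ring,
      PySem.List.slice_natCast_add, ← List.map_drop, ← List.map_take]
  exact parse_map _ 0 (fun x hx =>
    h01 x (List.mem_of_mem_drop (List.mem_of_mem_take hx)))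

-- ===== VERDICT (by name: the statement is the Claim_ definition above) =====
theorem ntotp_spec : Claim_equal_ntotp := by
  intro s t _ hpre
  have hpre' : ∀ c ∈ s.toList, c ≠ '=' →
      (PySem.List.index? pvAlphabet (PySem.Chars.lowerChar c)).isSome = true := by
    intro c hc hne
    have h := (List.all_eq_true.mp hpre) c hc
    simp only [Bool.or_eq_true, beq_iff_eq] at h
    rcases h with h | h
    · exact absurd h hne
    · exact h
  show ntotp s t = ntotp_alt s t
  simp only [ntotp, ntotp_alt]
  rw [foldl_bits, List.nil_append]
  rw [bits_map _ hpre', trunc_eq, pad_rep_eq]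
  have h01 : ∀ x ∈ (s.toList.flatMap (fun c => if c = '=' then [] else pvBits5 (pvVal c))).take
      ((s.toList.flatMap (fun c => if c = '=' then [] else pvBits5 (pvVal c))).length -
        (s.toList.flatMap (fun c => if c = '=' then [] else pvBits5 (pvVal c))).length % 8) ++
      List.replicate (512 - ((s.toList.flatMap (fun c => if c = '=' then [] else pvBits5 (pvVal c))).take
        ((s.toList.flatMap (fun c => if c = '=' then [] else pvBits5 (pvVal c))).length -
          (s.toList.flatMap (fun c => if c = '=' then [] else pvBits5 (pvVal c))).length % 8)).length) 0,
      x = 0 ∨ x = 1 := by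
    intro x hx
    rcases List.mem_append.mp hx with hx | hx
    · obtain ⟨c, -, hc⟩ := List.mem_flatMap.mp (List.mem_of_mem_take hx)
      by_cases he : c = '='
      · simp [he] at hc
      · simp only [he, if_false] at hc
        exact mem_bits5 _ x hc
    · left; exact (List.eq_of_mem_replicate hx)
  rw [chunksA_eq _ h01, ← words_eq_chunks]
  simp only [pvBxor, pvXor, pvBand, pvAnd]
  rw [sha1_eq, sha1_eq, accum_H]
  have hsh : ∀ v : Int, ((160 : Int) - 32 - Int.land v 15 * 8)
      = (128 : Int) - 8 * Int.land v 15 := by intro v; ring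
  rw [hsh]
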